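-- pv_equiv track=rewrite | github.com/jbdanquah2/competitive-programming | C_Parity_Sort.py | can_sort_by_swaps
-- ===== SOURCE A (Python) =====
-- def can_sort_by_swaps(n, a):
--     even_numbers = [x for x in a if x % 2 == 0]
--     odd_numbers = [x for x in a if x % 2 != 0]
--
--     sorted_even = sorted(even_numbers)
--     sorted_odd = sorted(odd_numbers)
--
--     even_idx = 0
--     odd_idx = 0
--
--     sorted_combined = []
--     for num in a:
--         if num % 2 == 0:
--             sorted_combined.append(sorted_even[even_idx])
--             even_idx += 1
--         else:
--             sorted_combined.append(sorted_odd[odd_idx])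
--             odd_idx += 1
--
--     return sorted_combined == sorted(a)
-- ===== SOURCE B (Python) =====
-- def can_sort_by_swaps(n, a):
--     s = sorted(a)
--     return [x % 2 for x in a] == [x % 2 for x in s]
-- ===== Notes on version B (the rewrite author's own statement) =====
-- stated objective: simpler
-- what changed: Instead of splitting into even/odd lists, sorting each and reconstructing a combined array to compare with sorted(a), B sorts the list once and compares the positionwise parity pattern of a with that of sorted(a).
import Mathlib
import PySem

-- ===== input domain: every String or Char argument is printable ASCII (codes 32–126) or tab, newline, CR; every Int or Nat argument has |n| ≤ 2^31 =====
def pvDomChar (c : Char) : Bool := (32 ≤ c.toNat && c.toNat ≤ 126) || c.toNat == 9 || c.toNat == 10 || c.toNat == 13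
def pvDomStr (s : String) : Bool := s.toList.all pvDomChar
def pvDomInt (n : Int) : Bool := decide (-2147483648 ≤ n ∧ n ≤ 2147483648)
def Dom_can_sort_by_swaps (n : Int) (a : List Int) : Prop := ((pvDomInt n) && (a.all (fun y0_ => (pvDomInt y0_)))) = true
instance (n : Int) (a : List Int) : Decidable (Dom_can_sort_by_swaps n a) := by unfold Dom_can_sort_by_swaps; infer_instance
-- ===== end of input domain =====

-- B replaces A's even/odd split + sort-each + positionwise reconstruction with one sort of the
-- whole list and a positionwise parity-pattern comparison (objective: simpler).


-- ===== PORT A =====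
-- the reconstruction loop: walk a, taking the next element from sorted_even for an even
-- entry and from sorted_odd for an odd one (the idx counters become list consumption;
-- the [] branches are Python's IndexError, never reached: the supplies are exactly long enough)
def pvCombine : List Int → List Int → List Int → List Int
  | [], _, _ => []
  | num :: rest, es, os =>
    if PySem.Int.mod num 2 = 0 then
      match es with
      | e :: es' => e :: pvCombine rest es' os
      | [] => []
    else
      match os with
      | o :: os' => o :: pvCombine rest es os'
      | [] => []

def can_sort_by_swaps (n : Int) (a : List Int) : Bool :=
  let even_numbers := a.filter (fun x => decide (PySem.Int.mod x 2 = 0))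
  let odd_numbers := a.filter (fun x => decide (¬ PySem.Int.mod x 2 = 0))
  let sorted_even := PySem.List.sorted even_numbers (fun x => x) false
  let sorted_odd := PySem.List.sorted odd_numbers (fun x => x) false
  let sorted_combined := pvCombine a sorted_even sorted_odd
  decide (sorted_combined = PySem.List.sorted a (fun x => x) false)

-- ===== PORT B =====
def can_sort_by_swaps_alt (n : Int) (a : List Int) : Bool :=
  let s := PySem.List.sorted a (fun x => x) false
  decide (a.map (fun x => PySem.Int.mod x 2) = s.map (fun x => PySem.Int.mod x 2))

-- ===== PRECONDITION & SPEC =====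
def Spec_can_sort_by_swaps (n : Int) (a : List Int) (out : Bool) : Prop := out = can_sort_by_swaps_alt n a
instance (n : Int) (a : List Int) (out : Bool) : Decidable (Spec_can_sort_by_swaps n a out) := by unfold Spec_can_sort_by_swaps; infer_instance

-- ===== CLAIM (what is proved, stated in full; the proofs are below) =====
def Claim_equal_can_sort_by_swaps : Prop := ∀ (n : Int) (a : List Int), Dom_can_sort_by_swaps n a → Spec_can_sort_by_swaps n a (can_sort_by_swaps n a)

-- ===== LEMMAS AND PROOFS =====

theorem pvMod_two (x : Int) : PySem.Int.mod x 2 = 0 ∨ PySem.Int.mod x 2 = 1 := by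
  have h1 := PySem.Int.mod_nonneg x (b := 2) (by norm_num)
  have h2 := PySem.Int.mod_lt x (b := 2) (by norm_num)
  omega

-- the combined list has a's parity pattern, provided the even/odd supplies are
-- really even/odd and exactly long enough
theorem pvCombine_map_par (a : List Int) : ∀ (es os : List Int),
    (∀ e ∈ es, PySem.Int.mod e 2 = 0) → (∀ o ∈ os, PySem.Int.mod o 2 = 1) →
    es.length = (a.filter (fun x => decide (PySem.Int.mod x 2 = 0))).length →
    os.length = (a.filter (fun x => decide (¬ PySem.Int.mod x 2 = 0))).length →
    (pvCombine a es os).map (fun x => PySem.Int.mod x 2) = a.map (fun x => PySem.Int.mod x 2) := by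
  induction a with
  | nil => intro es os _ _ _ _; simp [pvCombine]
  | cons x rest ih =>
    intro es os hes hos hle hlo
    by_cases hx : PySem.Int.mod x 2 = 0
    · simp only [List.filter_cons, hx, decide_true, not_true_eq_false, decide_false,
        List.length_cons, if_true] at hle hlo
      match es, hle with
      | e :: es', hle =>
        simp only [pvCombine, if_pos hx, List.map_cons]
        refine congrArg₂ _ ?_ ?_
        · rw [hes e (by simp), hx]
        · exact ih es' os (fun y hy => hes y (by simp [hy])) hos (by simpa using hle) hlo
    · simp only [List.filter_cons, hx, decide_false, not_false_eq_true, decide_true,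
        List.length_cons, if_true] at hle hlo
      match os, hlo with
      | o :: os', hlo =>
        simp only [pvCombine, if_neg hx, List.map_cons]
        refine congrArg₂ _ ?_ ?_
        · rw [hos o (by simp)]
          rcases pvMod_two x with h | h
          · exact absurd h hx
          · omega
        · exact ih es os' hes (fun y hy => hos y (by simp [hy])) hle (by simpa using hlo)

-- if a and s have the same parity pattern, recombining s's evens and odds along a gives back s
theorem pvCombine_filter (a : List Int) : ∀ (s : List Int),
    a.map (fun x => PySem.Int.mod x 2) = s.map (fun x => PySem.Int.mod x 2) →
    pvCombine a (s.filter (fun x => decide (PySem.Int.mod x 2 = 0)))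
               (s.filter (fun x => decide (¬ PySem.Int.mod x 2 = 0))) = s := by
  induction a with
  | nil =>
    intro s h
    have : s = [] := by
      cases s with
      | nil => rfl
      | cons y t => simp at h
    simp [this, pvCombine]
  | cons x rest ih =>
    intro s h
    cases s with
    | nil => simp at h
    | cons y t =>
      simp only [List.map_cons, List.cons.injEq] at h
      obtain ⟨hxy, ht⟩ := h
      by_cases hx : PySem.Int.mod x 2 = 0
      · have hy : PySem.Int.mod y 2 = 0 := by omega
        simp only [List.filter_cons, hy, decide_true, not_true_eq_false, decide_false, if_true]
        simp only [pvCombine, if_pos hx]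
        exact congrArg _ (ih t ht)
      · have hy : ¬ PySem.Int.mod y 2 = 0 := by omega
        simp only [List.filter_cons, hy, decide_false, not_false_eq_true, decide_true, if_true]
        simp only [pvCombine, if_neg hx]
        exact congrArg _ (ih t ht)

-- sorting then filtering = filtering then sorting
theorem pvSorted_filter (a : List Int) (p : Int → Bool) :
    PySem.List.sorted (a.filter p) (fun x => x) false
      = (PySem.List.sorted a (fun x => x) false).filter p := by
  refine PySem.List.sorted_id_eq_of_perm_of_pairwise _ _ ?_ ?_
  · exact (PySem.List.sorted_perm a (fun x => x) false).filter p
  · exact (PySem.List.sorted_pairwise a (fun x => x)).sublist List.filter_sublist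

-- ===== VERDICT (by name: the statement is the Claim_ definition above) =====
theorem can_sort_by_swaps_spec : Claim_equal_can_sort_by_swaps := by
  intro n a _
  unfold Spec_can_sort_by_swaps can_sort_by_swaps can_sort_by_swaps_alt
  simp only [pvSorted_filter]
  set s := PySem.List.sorted a (fun x => x) false with hs
  have hperm : s.Perm a := PySem.List.sorted_perm a (fun x => x) false
  rw [decide_eq_decide]
  constructor
  · intro hcomb
    have := pvCombine_map_par a
      (s.filter (fun x => decide (PySem.Int.mod x 2 = 0)))
      (s.filter (fun x => decide (¬ PySem.Int.mod x 2 = 0)))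
      (fun e he => by simpa using (List.of_mem_filter he))
      (fun o ho => by
        have hne := List.of_mem_filter ho
        simp only [decide_eq_true_eq] at hne
        rcases pvMod_two o with h | h
        · exact absurd h hne
        · exact h)
      ((hperm.filter _).length_eq)
      ((hperm.filter _).length_eq)
    rw [hcomb] at this
    exact this.symm
  · intro hpar
    exact pvCombine_filter a s hpar
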